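-- pv_equiv track=rewrite | github.com/NamanKansal2000/Python | google foobar/cake_max_same_patterns.py | max_lst
-- ===== SOURCE A (Python) =====
-- def max_lst(lst):
--     max = 0
--     for i in lst:
--         # list(dict.values()) gives list all the values in dictionary
--         m = sum(i.values())
--         if m > max:
--             max = m
--     n_lst = []
--     for i in lst:
--         # we extract all the dictionary with max sum
--         if sum(i.values()) == max:
--             n_lst.append(i)
--
--     return (n_lst)
-- ===== SOURCE B (Python) =====
-- def max_lst(lst):
--     best = 0
--     result = []
--     for i in lst:
--         s = sum(i.values())
--         if s > best:
--             best = s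
--             result = [i]
--         elif s == best:
--             result.append(i)
--     return result
-- ===== Notes on version B (the rewrite author's own statement) =====
-- stated objective: alternative
-- what changed: Replaces A's two passes (one to find the max value-sum, one to collect all dicts attaining it) with a single streaming pass that maintains the running best and the current winners list, resetting it when a larger sum appears.
import Mathlib
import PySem

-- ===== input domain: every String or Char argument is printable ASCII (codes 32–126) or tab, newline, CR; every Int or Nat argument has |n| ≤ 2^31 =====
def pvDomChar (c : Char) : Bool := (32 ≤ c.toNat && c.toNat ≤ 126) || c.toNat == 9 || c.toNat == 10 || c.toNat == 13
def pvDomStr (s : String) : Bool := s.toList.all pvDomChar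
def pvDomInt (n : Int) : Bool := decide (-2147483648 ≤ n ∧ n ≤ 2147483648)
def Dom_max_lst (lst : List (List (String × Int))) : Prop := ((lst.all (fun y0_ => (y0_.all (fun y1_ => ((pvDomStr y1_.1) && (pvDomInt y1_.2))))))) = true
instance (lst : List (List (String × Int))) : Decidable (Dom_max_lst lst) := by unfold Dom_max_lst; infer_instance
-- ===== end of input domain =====

-- B replaces A's two passes (max, then filter) by one streaming pass keeping the running best sum and current winners.

-- sum(i.values()) for a dict given as an association list (shared primitive of both ports)
def sumVals (i : List (String × Int)) : Int := ((PySem.Dict.ofList i).values).sum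

-- ===== PORT A =====
def max_lst (lst : List (List (String × Int))) : List (List (String × Int)) :=
  -- first loop: max = 0; for i in lst: if sum(i.values()) > max: max = m
  let mx : Int := lst.foldl (fun mx i => let m := sumVals i; if m > mx then m else mx) 0
  -- second loop: n_lst = []; append every i with sum(i.values()) == max
  lst.foldl (fun n_lst i => if sumVals i = mx then n_lst ++ [i] else n_lst) []

-- ===== PORT B =====
-- single pass: best = 0, result = []; s > best resets result to [i]; s == best appends
def bLoop : List (List (String × Int)) → Int → List (List (String × Int)) → List (List (String × Int))
  | [], _, result => result
  | i :: rest, best, result =>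
    let s := sumVals i
    if s > best then bLoop rest s [i]
    else if s = best then bLoop rest best (result ++ [i])
    else bLoop rest best result

def max_lst_alt (lst : List (List (String × Int))) : List (List (String × Int)) :=
  bLoop lst 0 []

-- ===== PRECONDITION & SPEC =====
def Spec_max_lst (lst : List (List (String × Int))) (out : List (List (String × Int))) : Prop := out = max_lst_alt lst
instance (lst : List (List (String × Int))) (out : List (List (String × Int))) : Decidable (Spec_max_lst lst out) := by unfold Spec_max_lst; infer_instance

-- ===== CLAIM (what is proved, stated in full; the proofs are below) =====
def Claim_equal_max_lst : Prop := ∀ (lst : List (List (String × Int))), Dom_max_lst lst → Spec_max_lst lst (max_lst lst)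

-- ===== LEMMAS AND PROOFS =====

-- the running maximum of A's first loop, started from b
def runMax (l : List (List (String × Int))) (b : Int) : Int :=
  l.foldl (fun mx i => let m := sumVals i; if m > mx then m else mx) b

theorem runMax_nil (b : Int) : runMax [] b = b := rfl

theorem runMax_cons (i : List (String × Int)) (l : List (List (String × Int))) (b : Int) :
    runMax (i :: l) b = runMax l (if sumVals i > b then sumVals i else b) := rfl

theorem le_runMax (l : List (List (String × Int))) (b : Int) : b ≤ runMax l b := by
  induction l generalizing b with
  | nil => simp [runMax_nil]
  | cons i rest ih =>
    rw [runMax_cons]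
    split_ifs with h
    · exact le_trans (le_of_lt h) (ih _)
    · exact ih _

-- bLoop in closed form: the winners of the whole list, prefixed by res exactly when best survives
theorem bLoop_eq (l : List (List (String × Int))) (b : Int) (res : List (List (String × Int))) :
    bLoop l b res = (if runMax l b = b then res else []) ++ l.filter (fun i => sumVals i = runMax l b) := by
  induction l generalizing b res with
  | nil => simp [bLoop, runMax_nil]
  | cons i rest ih =>
    rw [runMax_cons]
    show (if sumVals i > b then bLoop rest (sumVals i) [i]
          else if sumVals i = b then bLoop rest b (res ++ [i])
          else bLoop rest b res) = _
    by_cases hgt : sumVals i > b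
    · have hM : sumVals i ≤ runMax rest (sumVals i) := le_runMax _ _
      rw [if_pos hgt, ih, if_pos hgt]
      have hne : ¬ runMax rest (sumVals i) = b := by omega
      rw [if_neg hne]
      by_cases he : sumVals i = runMax rest (sumVals i)
      · rw [if_pos he.symm, List.filter_cons_of_pos (by simpa using he)]
        simp
      · rw [if_neg (fun h => he h.symm), List.filter_cons_of_neg (by simpa using he)]
    · rw [if_neg hgt, if_neg hgt]
      have hM : b ≤ runMax rest b := le_runMax _ _
      by_cases heq : sumVals i = b
      · rw [if_pos heq, ih]
        by_cases hb : runMax rest b = b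
        · rw [if_pos hb, if_pos hb]
          have : sumVals i = runMax rest b := by omega
          simp [this]
        · rw [if_neg hb, if_neg hb]
          have : ¬ sumVals i = runMax rest b := by omega
          simp [this]
      · rw [if_neg heq, ih]
        have : ¬ sumVals i = runMax rest b := by omega
        simp [this]

-- ===== VERDICT (by name: the statement is the Claim_ definition above) =====
theorem max_lst_spec : Claim_equal_max_lst := by
  intro lst _
  show max_lst lst = max_lst_alt lst
  unfold max_lst_alt
  rw [bLoop_eq]
  show lst.foldl (fun n_lst i => if sumVals i = runMax lst 0 then n_lst ++ [i] else n_lst) [] = _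
  rw [PySem.List.foldl_append_ite_eq_filter (p := fun i => sumVals i = runMax lst 0)]
  split <;> rfl
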